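-- pv_equiv track=rewrite | github.com/araroot/themes | app_interactive.py | match_pivot_to_rank
-- ===== SOURCE A (Python) =====
-- def match_pivot_to_rank(rank_date_tuple, available_pivots_dict):
--     """Match rank date to appropriate pivot file"""
--     year, month, day = rank_date_tuple
--
--     # End of month (day >= 25): same month pivot
--     # Mid month (day < 25): previous month pivot
--     if day >= 25:
--         target_year, target_month = year, month
--     else:
--         target_month = month - 1
--         target_year = year
--         if target_month < 1:
--             target_month = 12
--             target_year -= 1
--
--     # Find matching pivot
--     for pivot_name, (py, pm) in available_pivots_dict.items():
--         if py == target_year and pm == target_month: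
--             return pivot_name
--
--     # Fallback: return closest earlier pivot
--     sorted_pivots = sorted(available_pivots_dict.items(), key=lambda x: (x[1][0], x[1][1]), reverse=True)
--     for pivot_name, (py, pm) in sorted_pivots:
--         if (py, pm) <= (target_year, target_month):
--             return pivot_name
--
--     # Last resort: return latest pivot
--     if sorted_pivots:
--         return sorted_pivots[0][0]
--     return None
-- ===== SOURCE B (Python) =====
-- def match_pivot_to_rank(rank_date_tuple, available_pivots_dict):
--     """Match rank date to appropriate pivot file (single linear pass)"""
--     year, month, day = rank_date_tuple
--     if day >= 25:
--         target = (year, month)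
--     elif month > 1:
--         target = (year, month - 1)
--     else:
--         target = (year - 1, 12)
--
--     best_le = None   # (name, key): largest key <= target, first-seen wins ties
--     best_any = None  # (name, key): largest key overall, first-seen wins ties
--     for pivot_name, (py, pm) in available_pivots_dict.items():
--         key = (py, pm)
--         if best_any is None or best_any[1] < key:
--             best_any = (pivot_name, key)
--         if key <= target and (best_le is None or best_le[1] < key):
--             best_le = (pivot_name, key)
--
--     if best_le is not None:
--         return best_le[0]
--     if best_any is not None:
--         return best_any[0]
--     return None
-- ===== Notes on version B (the rewrite author's own statement) =====
-- stated objective: faster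
-- what changed: Replaced the exact-match scan plus descending stable sort plus fallback scans with one linear pass maintaining two running selections (largest key <= target and largest key overall, strict-greater updates so the first-seen pivot wins ties).
import Mathlib
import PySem

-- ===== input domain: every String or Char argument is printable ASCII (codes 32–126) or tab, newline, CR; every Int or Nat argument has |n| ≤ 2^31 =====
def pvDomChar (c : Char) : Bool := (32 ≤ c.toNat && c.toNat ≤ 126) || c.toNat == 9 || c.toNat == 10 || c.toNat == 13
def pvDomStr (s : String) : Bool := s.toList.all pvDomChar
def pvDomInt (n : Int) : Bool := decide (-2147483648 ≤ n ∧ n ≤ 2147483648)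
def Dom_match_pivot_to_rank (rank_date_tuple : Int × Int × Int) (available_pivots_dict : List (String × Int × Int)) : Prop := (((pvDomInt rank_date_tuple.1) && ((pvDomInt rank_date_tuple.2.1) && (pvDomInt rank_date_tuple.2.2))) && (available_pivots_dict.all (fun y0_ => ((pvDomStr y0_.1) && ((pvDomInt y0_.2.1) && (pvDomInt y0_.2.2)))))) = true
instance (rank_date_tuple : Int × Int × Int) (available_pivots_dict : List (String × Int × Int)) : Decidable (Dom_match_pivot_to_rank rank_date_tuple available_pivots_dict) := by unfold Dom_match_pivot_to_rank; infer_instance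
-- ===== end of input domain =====

-- B replaces A's exact-match scan + descending stable sort + fallback scans with one
-- linear pass keeping two running argmax selections (objective: faster).

-- ===== PORT A =====
def match_pivot_to_rank (rank_date_tuple : Int × Int × Int) (available_pivots_dict : List (String × Int × Int)) : Option String :=
  let year := rank_date_tuple.1
  let month := rank_date_tuple.2.1
  let day := rank_date_tuple.2.2
  let tgt : Int × Int :=
    if day ≥ 25 then (year, month)
    else
      let tm := month - 1
      if tm < 1 then (year - 1, 12) else (year, tm)
  -- first loop: exact match on (target_year, target_month)
  match available_pivots_dict.find? (fun e => decide (e.2.1 = tgt.1) && decide (e.2.2 = tgt.2)) with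
  | some e => some e.1
  | none =>
    -- fallback: sorted(items, key=lambda x: (x[1][0], x[1][1]), reverse=True), then first (py,pm) <= target (tuple <= is lexicographic)
    let sorted_pivots := PySem.List.sorted2 available_pivots_dict (fun x => x.2.1) (fun x => x.2.2) true
    match sorted_pivots.find? (fun e => decide (e.2.1 < tgt.1 ∨ (e.2.1 = tgt.1 ∧ e.2.2 ≤ tgt.2))) with
    | some e => some e.1
    | none =>
      match sorted_pivots with
      | [] => none
      | e :: _ => some e.1

-- ===== PORT B =====
-- one loop step: update best_any, and best_le when key <= target (strict-greater updates)
def pvStep (tgt : Int × Int) (acc : Option (String × Int × Int) × Option (String × Int × Int)) (e : String × Int × Int) : Option (String × Int × Int) × Option (String × Int × Int) :=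
  let bAny :=
    match acc.2 with
    | none => some e
    | some b => if decide (b.2.1 < e.2.1 ∨ (b.2.1 = e.2.1 ∧ b.2.2 < e.2.2)) then some e else some b
  let bLe :=
    if decide (e.2.1 < tgt.1 ∨ (e.2.1 = tgt.1 ∧ e.2.2 ≤ tgt.2)) then
      match acc.1 with
      | none => some e
      | some b => if decide (b.2.1 < e.2.1 ∨ (b.2.1 = e.2.1 ∧ b.2.2 < e.2.2)) then some e else some b
    else acc.1
  (bLe, bAny)

def match_pivot_to_rank_alt (rank_date_tuple : Int × Int × Int) (available_pivots_dict : List (String × Int × Int)) : Option String :=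
  let year := rank_date_tuple.1
  let month := rank_date_tuple.2.1
  let day := rank_date_tuple.2.2
  let tgt : Int × Int :=
    if day ≥ 25 then (year, month)
    else if month > 1 then (year, month - 1)
    else (year - 1, 12)
  let r := available_pivots_dict.foldl (pvStep tgt) (none, none)
  match r.1 with
  | some b => some b.1
  | none =>
    match r.2 with
    | some b => some b.1
    | none => none

-- ===== PRECONDITION & SPEC =====
def Spec_match_pivot_to_rank (rank_date_tuple : Int × Int × Int) (available_pivots_dict : List (String × Int × Int)) (out : Option String) : Prop := out = match_pivot_to_rank_alt rank_date_tuple available_pivots_dict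
instance (rank_date_tuple : Int × Int × Int) (available_pivots_dict : List (String × Int × Int)) (out : Option String) : Decidable (Spec_match_pivot_to_rank rank_date_tuple available_pivots_dict out) := by unfold Spec_match_pivot_to_rank; infer_instance

-- ===== CLAIM (what is proved, stated in full; the proofs are below) =====
def Claim_equal_match_pivot_to_rank : Prop := ∀ (rank_date_tuple : Int × Int × Int) (available_pivots_dict : List (String × Int × Int)), Dom_match_pivot_to_rank rank_date_tuple available_pivots_dict → Spec_match_pivot_to_rank rank_date_tuple available_pivots_dict (match_pivot_to_rank rank_date_tuple available_pivots_dict)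

-- ===== LEMMAS AND PROOFS =====

-- the comparison function sorted2 … true uses (insert before the first strictly-smaller key)
def pvBef (x y : String × Int × Int) : Bool :=
  decide (y.2.1 < x.2.1) || (!decide (x.2.1 < y.2.1) && decide (y.2.2 < x.2.2))

-- the two Bool tests shared by the proofs
def pvLeT (tgt : Int × Int) (e : String × Int × Int) : Bool :=
  decide (e.2.1 < tgt.1 ∨ (e.2.1 = tgt.1 ∧ e.2.2 ≤ tgt.2))
def pvLt (b e : String × Int × Int) : Bool :=
  decide (b.2.1 < e.2.1 ∨ (b.2.1 = e.2.1 ∧ b.2.2 < e.2.2))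

theorem pv_sorted2_eq (d : List (String × Int × Int)) :
    PySem.List.sorted2 d (fun x => x.2.1) (fun x => x.2.2) true
      = d.foldl (fun acc x => PySem.List.insertBy pvBef x acc) [] := rfl

theorem pv_insertBy_nil (x : String × Int × Int) : PySem.List.insertBy pvBef x [] = [x] := rfl
theorem pv_insertBy_cons (x y : String × Int × Int) (ys : List (String × Int × Int)) :
    PySem.List.insertBy pvBef x (y :: ys)
      = if pvBef x y then x :: y :: ys else y :: PySem.List.insertBy pvBef x ys := rfl

theorem pv_head_insert (x : String × Int × Int) (S : List (String × Int × Int)) :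
    (PySem.List.insertBy pvBef x S).head? =
      match S.head? with
      | none => some x
      | some h => if pvLt h x then some x else some h := by
  cases S with
  | nil => simp [pv_insertBy_nil]
  | cons h t =>
      rw [pv_insertBy_cons]
      by_cases hb : pvBef x h = true
      · have : pvLt h x = true := by
          simp [pvBef] at hb; simp [pvLt]; omega
        simp [hb, this]
      · have : pvLt h x = false := by
          simp [pvBef] at hb; simp [pvLt]; omega
        simp [hb, this]

theorem pv_pairwise_insert (x : String × Int × Int) (S : List (String × Int × Int))
    (h : S.Pairwise (fun a b => pvLt a b = false)) :
    (PySem.List.insertBy pvBef x S).Pairwise (fun a b => pvLt a b = false) := by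
  induction S with
  | nil => simp [pv_insertBy_nil]
  | cons h0 t ih =>
      rw [pv_insertBy_cons]
      rcases List.pairwise_cons.mp h with ⟨hall, ht⟩
      by_cases hb : pvBef x h0 = true
      · rw [if_pos hb]
        refine List.pairwise_cons.mpr ⟨?_, h⟩
        intro y hy
        rcases List.mem_cons.mp hy with hy | hy
        · subst hy; simp [pvBef] at hb; simp [pvLt]; omega
        · have h1 := hall y hy
          simp [pvBef] at hb; simp [pvLt] at h1 ⊢; omega
      · rw [if_neg hb]
        refine List.pairwise_cons.mpr ⟨?_, ih ht⟩
        intro y hy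
        rcases (PySem.List.mem_insertBy pvBef x y t).mp hy with hy | hy
        · subst hy; simp [pvBef] at hb; simp [pvLt]; omega
        · exact hall y hy

theorem pv_find_insert (tgt : Int × Int) (x : String × Int × Int) (S : List (String × Int × Int))
    (h : S.Pairwise (fun a b => pvLt a b = false)) :
    (PySem.List.insertBy pvBef x S).find? (pvLeT tgt) =
      if pvLeT tgt x then
        match S.find? (pvLeT tgt) with
        | none => some x
        | some m => if pvLt m x then some x else some m
      else S.find? (pvLeT tgt) := by
  induction S with
  | nil =>
      rw [pv_insertBy_nil]
      by_cases hx : pvLeT tgt x = true <;> simp [List.find?, hx]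
  | cons h0 t ih =>
      rcases List.pairwise_cons.mp h with ⟨hall, ht⟩
      rw [pv_insertBy_cons]
      by_cases hb : pvBef x h0 = true
      · -- x inserted at the front: every element of h0 :: t has key ≤ key h0 < key x
        rw [if_pos hb]
        by_cases hx : pvLeT tgt x = true
        · rw [List.find?_cons_of_pos hx, if_pos hx]
          cases hm : (h0 :: t).find? (pvLeT tgt) with
          | none => rfl
          | some m =>
              have hmem := List.mem_of_find?_eq_some hm
              have hlt : pvLt m x = true := by
                rcases List.mem_cons.mp hmem with hmem | hmem
                · subst hmem; simp [pvBef] at hb; simp [pvLt]; omega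
                · have h1 := hall m hmem
                  simp [pvBef] at hb; simp [pvLt] at h1 ⊢; omega
              simp [hlt]
        · rw [List.find?_cons_of_neg hx, if_neg hx]
      · -- x goes past h0 (key x ≤ key h0)
        rw [if_neg hb]
        have hlt : pvLt h0 x = false := by
          simp [pvBef] at hb; simp [pvLt]; omega
        by_cases hh : pvLeT tgt h0 = true
        · rw [List.find?_cons_of_pos hh, List.find?_cons_of_pos hh]
          by_cases hx : pvLeT tgt x = true
          · rw [if_pos hx]; simp [hlt]
          · rw [if_neg hx]
        · rw [List.find?_cons_of_neg hh, List.find?_cons_of_neg hh]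
          exact ih ht

-- main invariant: folding insertBy on the A side and pvStep on the B side stay in lockstep
theorem pv_fold_inv (tgt : Int × Int) (d : List (String × Int × Int)) :
    ∀ (S : List (String × Int × Int)) (acc : Option (String × Int × Int) × Option (String × Int × Int)),
      S.Pairwise (fun a b => pvLt a b = false) →
      S.find? (pvLeT tgt) = acc.1 →
      S.head? = acc.2 →
      (d.foldl (fun acc x => PySem.List.insertBy pvBef x acc) S).Pairwise (fun a b => pvLt a b = false) ∧
      (d.foldl (fun acc x => PySem.List.insertBy pvBef x acc) S).find? (pvLeT tgt) = (d.foldl (pvStep tgt) acc).1 ∧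
      (d.foldl (fun acc x => PySem.List.insertBy pvBef x acc) S).head? = (d.foldl (pvStep tgt) acc).2 := by
  induction d with
  | nil => intro S acc hp hf hh; exact ⟨hp, hf, hh⟩
  | cons x rest ih =>
      intro S acc hp hf hh
      simp only [List.foldl_cons]
      apply ih
      · exact pv_pairwise_insert x S hp
      · rw [pv_find_insert tgt x S hp]
        cases acc with
        | mk aLe aAny =>
            simp only [pvStep]
            by_cases hx : pvLeT tgt x = true
            · simp only [hx, pvLeT] at *
              rw [hf]
              cases aLe with
              | none => simp [hx]
              | some m => by_cases hm : pvLt m x = true <;> simp [hm, pvLt] at *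
            · have hx' : pvLeT tgt x = false := by simpa using hx
              simp only [pvLeT] at hx'
              simp [pvLeT, hx', hf, pvStep]
      · rw [pv_head_insert x S]
        cases acc with
        | mk aLe aAny =>
            simp only [pvStep]
            rw [hh]
            cases aAny with
            | none => simp
            | some b => by_cases hb : pvLt b x = true <;> simp [pvLt] at hb ⊢ <;> simp [hb]

-- once best_le holds an exact-key element it never changes
theorem pv_hold (tgt : Int × Int) (d : List (String × Int × Int))
    (b : String × Int × Int) (hb : b.2.1 = tgt.1 ∧ b.2.2 = tgt.2) :
    ∀ (a2 : Option (String × Int × Int)), (d.foldl (pvStep tgt) (some b, a2)).1 = some b := by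
  induction d with
  | nil => intro a2; rfl
  | cons x rest ih =>
      intro a2
      simp only [List.foldl_cons]
      have hstep : (pvStep tgt (some b, a2) x).1 = some b := by
        by_cases hx : (x.2.1 < tgt.1 ∨ (x.2.1 = tgt.1 ∧ x.2.2 ≤ tgt.2))
        · have hlt : ¬ (b.2.1 < x.2.1 ∨ (b.2.1 = x.2.1 ∧ b.2.2 < x.2.2)) := by omega
          simp [pvStep, hx, hlt]
        · simp [pvStep, hx]
      cases hs : pvStep tgt (some b, a2) x with
      | mk s1 s2 =>
          rw [hs] at hstep; simp at hstep; subst hstep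
          exact ih s2

-- one pvStep preserves "best_le is strictly below the target"
theorem pv_step_inv (tgt : Int × Int) (x : String × Int × Int)
    (aLe a2 : Option (String × Int × Int))
    (hinv : ∀ b, aLe = some b → (b.2.1 < tgt.1 ∨ (b.2.1 = tgt.1 ∧ b.2.2 < tgt.2)))
    (hxne : ¬ (x.2.1 = tgt.1 ∧ x.2.2 = tgt.2)) :
    ∀ b, (pvStep tgt (aLe, a2) x).1 = some b → (b.2.1 < tgt.1 ∨ (b.2.1 = tgt.1 ∧ b.2.2 < tgt.2)) := by
  intro b hb
  by_cases hle : (x.2.1 < tgt.1 ∨ (x.2.1 = tgt.1 ∧ x.2.2 ≤ tgt.2))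
  · cases aLe with
    | none =>
        simp [pvStep, hle] at hb; subst hb; omega
    | some b0 =>
        have h0 := hinv b0 rfl
        by_cases hlt : (b0.2.1 < x.2.1 ∨ (b0.2.1 = x.2.1 ∧ b0.2.2 < x.2.2))
        · simp [pvStep, hle, hlt] at hb; subst hb; omega
        · simp [pvStep, hle, hlt] at hb; subst hb; exact h0
  · simp [pvStep, hle] at hb; exact hinv b hb

-- if the exact-match loop of A finds e, B's best_le ends at exactly e
theorem pv_exact (tgt : Int × Int) (d : List (String × Int × Int)) (e : String × Int × Int)
    (hfind : d.find? (fun e => decide (e.2.1 = tgt.1) && decide (e.2.2 = tgt.2)) = some e) :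
    ∀ (aLe a2 : Option (String × Int × Int)),
      (∀ b, aLe = some b → (b.2.1 < tgt.1 ∨ (b.2.1 = tgt.1 ∧ b.2.2 < tgt.2))) →
      (d.foldl (pvStep tgt) (aLe, a2)).1 = some e := by
  induction d with
  | nil => simp at hfind
  | cons x rest ih =>
      intro aLe a2 hinv
      by_cases hx : (decide (x.2.1 = tgt.1) && decide (x.2.2 = tgt.2)) = true
      · rw [List.find?_cons_of_pos (p := fun y : String × Int × Int => decide (y.2.1 = tgt.1) && decide (y.2.2 = tgt.2)) hx] at hfind
        have hxe : x = e := by simpa using hfind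
        subst hxe
        simp only [List.foldl_cons]
        have hx' : x.2.1 = tgt.1 ∧ x.2.2 = tgt.2 := by simpa using hx
        have hstep : (pvStep tgt (aLe, a2) x).1 = some x := by
          have hle : (x.2.1 < tgt.1 ∨ (x.2.1 = tgt.1 ∧ x.2.2 ≤ tgt.2)) := by omega
          cases aLe with
          | none => simp [pvStep, hle]
          | some b =>
              have := hinv b rfl
              have hlt : (b.2.1 < x.2.1 ∨ (b.2.1 = x.2.1 ∧ b.2.2 < x.2.2)) := by omega
              simp [pvStep, hle, hlt]
        cases hs : pvStep tgt (aLe, a2) x with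
        | mk s1 s2 =>
            rw [hs] at hstep; simp at hstep; subst hstep
            exact pv_hold tgt rest x hx' s2
      · rw [List.find?_cons_of_neg (p := fun y : String × Int × Int => decide (y.2.1 = tgt.1) && decide (y.2.2 = tgt.2)) hx] at hfind
        simp only [List.foldl_cons]
        have hxne : ¬ (x.2.1 = tgt.1 ∧ x.2.2 = tgt.2) := by
          intro hc; apply hx; simp [hc.1, hc.2]
        cases hs : pvStep tgt (aLe, a2) x with
        | mk s1 s2 =>
            apply ih hfind
            intro b hb
            exact pv_step_inv tgt x aLe a2 hinv hxne b (by rw [hs]; exact hb)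

-- target computed by A equals target computed by B
theorem pv_tgt_eq (year month day : Int) :
    (if day ≥ 25 then (year, month)
     else if month - 1 < 1 then (year - 1, (12:Int)) else (year, month - 1))
    = (if day ≥ 25 then (year, month)
       else if month > 1 then (year, month - 1)
       else (year - 1, (12:Int))) := by
  split_ifs <;> first | rfl | omega

-- ===== VERDICT (by name: the statement is the Claim_ definition above) =====
theorem match_pivot_to_rank_spec : Claim_equal_match_pivot_to_rank := by
  intro rdt d _
  unfold Spec_match_pivot_to_rank
  simp only [match_pivot_to_rank, match_pivot_to_rank_alt]
  rw [pv_tgt_eq rdt.1 rdt.2.1 rdt.2.2]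
  generalize (if rdt.2.2 ≥ 25 then (rdt.1, rdt.2.1)
      else if rdt.2.1 > 1 then (rdt.1, rdt.2.1 - 1)
      else (rdt.1 - 1, (12:Int))) = tgt
  cases hf : d.find? (fun y : String × Int × Int => decide (y.2.1 = tgt.1) && decide (y.2.2 = tgt.2)) with
  | some e =>
      have he := pv_exact tgt d e hf none none (by intro b hb; cases hb)
      rw [he]
  | none =>
      obtain ⟨hp, hfind, hhead⟩ := pv_fold_inv tgt d [] (none, none) (by simp) (by simp) (by simp)
      rw [pv_sorted2_eq]
      rw [show (fun y : String × Int × Int => decide (y.2.1 < tgt.1 ∨ (y.2.1 = tgt.1 ∧ y.2.2 ≤ tgt.2))) = pvLeT tgt from rfl]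
      rw [hfind]
      cases hc : (d.foldl (pvStep tgt) (none, none)).1 with
      | some b => rfl
      | none =>
          cases hS : List.foldl (fun acc x => PySem.List.insertBy pvBef x acc) [] d with
          | nil =>
              rw [hS] at hhead
              simp only [List.head?_nil] at hhead
              rw [← hhead]
          | cons y t =>
              rw [hS] at hhead
              simp only [List.head?_cons] at hhead
              rw [← hhead]
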